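-- pv_equiv track=rewrite | github.com/linxuanm/language-and-compiler-course | day2_parser/ast.py | compare_unordered
-- ===== SOURCE A (Python) =====
-- def compare_unordered(a, b):
--     """
--     Compares two lists without considering their order.
--     Kinda ugly but AST nodes are not hashable.
--     """
--
--     b = list(b)
--
--     try:
--         for i in a:
--             b.remove(i)
--     except ValueError:
--         return False
--
--     return True
-- ===== SOURCE B (Python) =====
-- def compare_unordered(a, b):
--     sa = sorted(a)
--     sb = sorted(b)
--     j = 0
--     n = len(sb)
--     for x in sa:
--         while j < n and sb[j] < x:
--             j += 1
--         if j == n or sb[j] != x: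
--             return False
--         j += 1
--     return True
-- ===== Notes on version B (the rewrite author's own statement) =====
-- stated objective: alternative
-- what changed: Sorts both lists and decides sub-multiset inclusion with a single two-pointer merge scan over the sorted lists, instead of A's repeated list.remove search over a shrinking copy of b.
import Mathlib
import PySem

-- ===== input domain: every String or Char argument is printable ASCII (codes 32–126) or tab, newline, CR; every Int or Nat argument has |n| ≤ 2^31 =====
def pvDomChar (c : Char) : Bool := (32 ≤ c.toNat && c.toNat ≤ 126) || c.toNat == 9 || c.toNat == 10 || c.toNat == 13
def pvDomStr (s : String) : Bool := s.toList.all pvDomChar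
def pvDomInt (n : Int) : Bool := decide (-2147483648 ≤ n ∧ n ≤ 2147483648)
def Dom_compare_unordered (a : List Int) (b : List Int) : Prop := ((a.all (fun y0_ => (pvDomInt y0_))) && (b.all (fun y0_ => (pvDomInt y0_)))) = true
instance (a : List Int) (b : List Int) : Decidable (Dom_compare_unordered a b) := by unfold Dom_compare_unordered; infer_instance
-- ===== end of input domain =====

-- B sorts both lists and decides sub-multiset inclusion by a two-pointer merge scan,
-- replacing A's repeated list.remove search over a shrinking copy of b (alternative algorithm; not measured faster).


-- ===== PORT A =====
-- A's try/for loop: remove each element of a from (a copy of) b; ValueError (remove? = none) → False.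
def pvRemoveLoop (a : List Int) (b : List Int) : Bool :=
  match a with
  | [] => true
  | i :: rest =>
    match PySem.List.remove? b i with
    | none => false
    | some b' => pvRemoveLoop rest b'

def compare_unordered (a : List Int) (b : List Int) : Bool :=
  pvRemoveLoop a b

-- ===== PORT B =====
-- B's for/while two-pointer scan over the sorted lists: skip sb-elements below x,
-- then the current sb-element must equal x (else return False) and is consumed.
def pvMerge (sa sb : List Int) : Bool :=
  match sa, sb with
  | [], _ => true
  | _ :: _, [] => false
  | x :: xs, y :: ys =>
    if y < x then pvMerge (x :: xs) ys
    else if y == x then pvMerge xs ys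
    else false
termination_by structural sb

def compare_unordered_alt (a : List Int) (b : List Int) : Bool :=
  pvMerge (PySem.List.sorted a (fun v => v) false) (PySem.List.sorted b (fun v => v) false)

-- ===== PRECONDITION & SPEC =====
def Spec_compare_unordered (a : List Int) (b : List Int) (out : Bool) : Prop := out = compare_unordered_alt a b
instance (a : List Int) (b : List Int) (out : Bool) : Decidable (Spec_compare_unordered a b out) := by unfold Spec_compare_unordered; infer_instance

-- ===== CLAIM (what is proved, stated in full; the proofs are below) =====
def Claim_equal_compare_unordered : Prop := ∀ (a : List Int) (b : List Int), Dom_compare_unordered a b → Spec_compare_unordered a b (compare_unordered a b)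

-- ===== LEMMAS AND PROOFS =====
theorem remove?_of_mem (b : List Int) (x : Int) (h : x ∈ b) : PySem.List.remove? b x = some (b.erase x) := by
  simp only [PySem.List.remove?, List.erase_eq_eraseIdx]
  cases h' : List.idxOf? x b with
  | none => exact absurd (List.idxOf?_eq_none_iff.1 h') (by simpa using h)
  | some i => simp

theorem remove?_of_not_mem (b : List Int) (x : Int) (h : x ∉ b) : PySem.List.remove? b x = none := by
  simp only [PySem.List.remove?]
  rw [List.idxOf?_eq_none_iff.2 (by simpa using h)]
  rfl

-- (x :: t).count k written with an explicit indicator, convenient for omega.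
theorem count_cons_ind (h : Int) (t : List Int) (k : Int) :
    (h :: t).count k = t.count k + (if k = h then 1 else 0) := by
  rw [List.count_cons]
  by_cases hkh : k = h
  · simp [hkh]
  · simp [hkh]
    omega

-- A's loop succeeds exactly on sub-multisets: every value occurs in a at most as often as in b.
theorem removeLoop_iff_counts (a : List Int) : ∀ (b : List Int),
    pvRemoveLoop a b = true ↔ ∀ k : Int, a.count k ≤ b.count k := by
  induction a with
  | nil => intro b; simp [pvRemoveLoop]
  | cons x rest ih =>
    intro b
    by_cases hx : x ∈ b
    · rw [show pvRemoveLoop (x :: rest) b = pvRemoveLoop rest (b.erase x) by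
        simp [pvRemoveLoop, remove?_of_mem b x hx]]
      rw [ih (b.erase x)]
      have hxc : 1 ≤ b.count x := List.count_pos_iff.2 hx
      constructor
      · intro h k
        have hk := h k
        rw [count_cons_ind]
        by_cases hkx : k = x
        · subst hkx; rw [List.count_erase_self] at hk; rw [if_pos rfl]; omega
        · rw [List.count_erase_of_ne hkx] at hk; rw [if_neg hkx]; omega
      · intro h k
        have hk := h k
        rw [count_cons_ind] at hk
        by_cases hkx : k = x
        · subst hkx; rw [List.count_erase_self]; rw [if_pos rfl] at hk; omega
        · rw [List.count_erase_of_ne hkx]; rw [if_neg hkx] at hk; omega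
    · rw [show pvRemoveLoop (x :: rest) b = false by
        simp [pvRemoveLoop, remove?_of_not_mem b x hx]]
      simp only [Bool.false_eq_true, false_iff, not_forall, not_le]
      refine ⟨x, ?_⟩
      rw [List.count_eq_zero_of_not_mem hx, count_cons_ind, if_pos rfl]
      omega

-- B's merge scan also decides the sub-multiset condition, on sorted inputs.
theorem merge_iff_counts : ∀ (sa sb : List Int),
    sa.Pairwise (· ≤ ·) → sb.Pairwise (· ≤ ·) →
    (pvMerge sa sb = true ↔ ∀ k : Int, sa.count k ≤ sb.count k) := by
  intro sa
  induction sa with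
  | nil => intro sb _ _; simp [pvMerge]
  | cons x xs ihx =>
    intro sb
    induction sb with
    | nil =>
      intro _ _
      simp only [pvMerge, Bool.false_eq_true, false_iff, not_forall, not_le]
      refine ⟨x, ?_⟩
      rw [count_cons_ind, if_pos rfl]
      simp
    | cons y ys ihy =>
      intro ha hb
      have hbt := hb.tail
      have hat := ha.tail
      by_cases hyx : y < x
      · -- y is below every element of x :: xs: it can be skipped
        rw [show pvMerge (x :: xs) (y :: ys) = pvMerge (x :: xs) ys by
          simp [pvMerge, hyx]]
        rw [ihy ha hbt]
        have hy0 : (x :: xs).count y = 0 := by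
          rw [List.count_eq_zero]
          intro hmem
          rcases List.mem_cons.1 hmem with h | h
          · omega
          · have := (List.pairwise_cons.1 ha).1 y h; omega
        constructor
        · intro h k
          have hk := h k
          rw [count_cons_ind (h := y)]
          split <;> omega
        · intro h k
          have hk := h k
          rw [count_cons_ind (h := y)] at hk
          by_cases hky : k = y
          · subst hky; rw [hy0]; exact Nat.zero_le _
          · simp only [if_neg hky] at hk; omega
      · by_cases hyx2 : y = x
        · subst hyx2
          rw [show pvMerge (y :: xs) (y :: ys) = pvMerge xs ys by
            simp [pvMerge]]
          rw [ihx ys hat hbt]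
          constructor
          · intro h k
            have hk := h k
            rw [count_cons_ind, count_cons_ind]
            split <;> omega
          · intro h k
            have hk := h k
            rw [count_cons_ind, count_cons_ind] at hk
            split at hk <;> omega
        · -- x < y: x cannot occur in y :: ys
          rw [show pvMerge (x :: xs) (y :: ys) = false by
            simp [pvMerge, hyx, hyx2]]
          simp only [Bool.false_eq_true, false_iff, not_forall, not_le]
          refine ⟨x, ?_⟩
          have hx0 : (y :: ys).count x = 0 := by
            rw [List.count_eq_zero]
            intro hmem
            rcases List.mem_cons.1 hmem with h | h
            · omega
            · have := (List.pairwise_cons.1 hb).1 x h; omega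
          rw [hx0, count_cons_ind, if_pos rfl]
          omega

-- ===== VERDICT (by name: the statement is the Claim_ definition above) =====
theorem compare_unordered_spec : Claim_equal_compare_unordered := by
  intro a b _
  show compare_unordered a b = compare_unordered_alt a b
  unfold compare_unordered compare_unordered_alt
  have hca : ∀ k : Int, (PySem.List.sorted a (fun v => v) false).count k = a.count k :=
    fun k => (PySem.List.sorted_perm a (fun v => v) false).count_eq k
  have hcb : ∀ k : Int, (PySem.List.sorted b (fun v => v) false).count k = b.count k :=
    fun k => (PySem.List.sorted_perm b (fun v => v) false).count_eq k
  rw [Bool.eq_iff_iff, removeLoop_iff_counts,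
    merge_iff_counts _ _ (PySem.List.sorted_pairwise a (fun v => v))
      (PySem.List.sorted_pairwise b (fun v => v))]
  constructor
  · intro h k; rw [hca, hcb]; exact h k
  · intro h k; have := h k; rwa [hca, hcb] at this
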